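-- pv_equiv track=rewrite | github.com/mittleff/libcerf | dev/w/enumerate_diameters.py | sorted_diameters
-- ===== SOURCE A (Python) =====
-- def sorted_diameters(N):
--     D2 = set()
--     for j in range(1,N):
--         for i in range(1,N):
--             d2 = j**2 + i**2
--             if d2 > N:
--                 continue
--             D2.add(d2)
--     return sorted(D2)
-- ===== SOURCE B (Python) =====
-- def sorted_diameters(N):
--     # Same values, but both loops stop as soon as the squares exceed N: O(N) work instead of O(N^2).
--     D2 = set()
--     j = 1
--     while j * j + 1 <= N:
--         i = 1
--         while j * j + i * i <= N:
--             D2.add(j * j + i * i)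
--             i += 1
--         j += 1
--     return sorted(D2)
-- ===== Notes on version B (the rewrite author's own statement) =====
-- stated objective: faster
-- what changed: Replaced the two fixed range(1,N) scans (quadratically many iterations, most skipped by the d2 > N test) by while-loops that stop as soon as the sum of squares would exceed N, so only pairs actually inside the disk are visited.
import Mathlib
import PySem

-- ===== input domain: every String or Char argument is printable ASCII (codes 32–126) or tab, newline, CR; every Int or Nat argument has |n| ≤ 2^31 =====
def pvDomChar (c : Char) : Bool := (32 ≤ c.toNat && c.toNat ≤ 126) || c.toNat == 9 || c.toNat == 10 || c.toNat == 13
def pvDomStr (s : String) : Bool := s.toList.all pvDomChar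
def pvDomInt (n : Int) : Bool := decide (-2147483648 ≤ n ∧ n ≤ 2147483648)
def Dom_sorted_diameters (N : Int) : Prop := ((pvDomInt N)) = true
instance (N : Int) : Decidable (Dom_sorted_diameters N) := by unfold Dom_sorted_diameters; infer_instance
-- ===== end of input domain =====

-- B replaces A's two fixed range(1,N) scans by while-loops that stop once the squares exceed N,
-- visiting only the pairs inside the disk; a timing run measured it faster (objective: faster).

-- ===== PORT A =====
def sorted_diameters (N : Int) : List Int :=
  let D2 : PySem.Set Int :=
    (PySem.List.pyRange 1 N 1).foldl (fun acc j =>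
      (PySem.List.pyRange 1 N 1).foldl (fun acc i =>
        let d2 := j ^ 2 + i ^ 2
        if d2 > N then acc else PySem.Set.add acc d2) acc) PySem.Set.empty
  PySem.List.sorted D2 (fun x => x) false

-- ===== PORT B =====
-- i ≤ i*i for every integer (termination of the while-loops)
theorem int_le_mul_self (i : Int) : i ≤ i * i := by
  rcases Int.lt_or_le i 1 with h | h
  · nlinarith [mul_self_nonneg i]
  · nlinarith

-- inner 'while j*j + i*i <= N' loop of Source B
def altInner (N j i : Int) (acc : PySem.Set Int) : PySem.Set Int :=
  if _h : j * j + i * i ≤ N then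
    altInner N j (i + 1) (PySem.Set.add acc (j * j + i * i))
  else acc
termination_by (N + 1 - j * j - i).toNat
decreasing_by
  have := int_le_mul_self i
  omega

-- outer 'while j*j + 1 <= N' loop of Source B
def altOuter (N j : Int) (acc : PySem.Set Int) : PySem.Set Int :=
  if _h : j * j + 1 ≤ N then
    altOuter N (j + 1) (altInner N j 1 acc)
  else acc
termination_by (N - j).toNat
decreasing_by
  have := int_le_mul_self j
  omega

def sorted_diameters_alt (N : Int) : List Int :=
  PySem.List.sorted (altOuter N 1 PySem.Set.empty) (fun x => x) false

-- ===== PRECONDITION & SPEC =====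
def Spec_sorted_diameters (N : Int) (out : List Int) : Prop := out = sorted_diameters_alt N
instance (N : Int) (out : List Int) : Decidable (Spec_sorted_diameters N out) := by unfold Spec_sorted_diameters; infer_instance

-- ===== CLAIM (what is proved, stated in full; the proofs are below) =====
def Claim_equal_sorted_diameters : Prop := ∀ (N : Int), Dom_sorted_diameters N → Spec_sorted_diameters N (sorted_diameters N)

-- ===== LEMMAS AND PROOFS =====

-- membership in A's inner fold
theorem mem_innerFold (N j : Int) (l : List Int) (acc : PySem.Set Int) (x : Int) :
    x ∈ l.foldl (fun acc i =>
        let d2 := j ^ 2 + i ^ 2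
        if d2 > N then acc else PySem.Set.add acc d2) acc ↔
      x ∈ acc ∨ ∃ i ∈ l, j ^ 2 + i ^ 2 ≤ N ∧ x = j ^ 2 + i ^ 2 := by
  induction l generalizing acc with
  | nil => simp
  | cons a t ih =>
    simp only [List.foldl_cons, ih, List.mem_cons]
    split_ifs with h
    · constructor
      · rintro (hx | ⟨i, hi, hle, rfl⟩)
        · exact Or.inl hx
        · exact Or.inr ⟨i, Or.inr hi, hle, rfl⟩
      · rintro (hx | ⟨i, (rfl | hi), hle, rfl⟩)
        · exact Or.inl hx
        · omega
        · exact Or.inr ⟨i, hi, hle, rfl⟩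
    · rw [PySem.Set.mem_add]
      constructor
      · rintro ((hx | rfl) | ⟨i, hi, hle, rfl⟩)
        · exact Or.inl hx
        · exact Or.inr ⟨a, Or.inl rfl, by omega, rfl⟩
        · exact Or.inr ⟨i, Or.inr hi, hle, rfl⟩
      · rintro (hx | ⟨i, (rfl | hi), hle, rfl⟩)
        · exact Or.inl (Or.inl hx)
        · exact Or.inl (Or.inr rfl)
        · exact Or.inr ⟨i, hi, hle, rfl⟩

-- membership in A's outer fold
theorem mem_outerFold (N : Int) (l : List Int) (acc : PySem.Set Int) (x : Int) :
    x ∈ l.foldl (fun acc j =>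
        (PySem.List.pyRange 1 N 1).foldl (fun acc i =>
          let d2 := j ^ 2 + i ^ 2
          if d2 > N then acc else PySem.Set.add acc d2) acc) acc ↔
      x ∈ acc ∨ ∃ j ∈ l, ∃ i ∈ PySem.List.pyRange 1 N 1,
        j ^ 2 + i ^ 2 ≤ N ∧ x = j ^ 2 + i ^ 2 := by
  induction l generalizing acc with
  | nil => simp
  | cons a t ih =>
    simp only [List.foldl_cons, ih, mem_innerFold, List.mem_cons]
    constructor
    · rintro ((hx | ⟨i, hi, hle, rfl⟩) | ⟨j, hj, i, hi, hle, rfl⟩)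
      · exact Or.inl hx
      · exact Or.inr ⟨a, Or.inl rfl, i, hi, hle, rfl⟩
      · exact Or.inr ⟨j, Or.inr hj, i, hi, hle, rfl⟩
    · rintro (hx | ⟨j, (rfl | hj), i, hi, hle, rfl⟩)
      · exact Or.inl (Or.inl hx)
      · exact Or.inl (Or.inr ⟨i, hi, hle, rfl⟩)
      · exact Or.inr ⟨j, hj, i, hi, hle, rfl⟩

-- membership in B's inner loop (called with i ≥ 1)
theorem mem_altInner (N j : Int) (i : Int) (acc : PySem.Set Int) (hi : 1 ≤ i) (x : Int) :
    x ∈ altInner N j i acc ↔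
      x ∈ acc ∨ ∃ k, i ≤ k ∧ j * j + k * k ≤ N ∧ x = j * j + k * k := by
  fun_induction altInner N j i acc with
  | case1 i acc h ih =>
    rw [ih (by omega)]
    rw [PySem.Set.mem_add]
    constructor
    · rintro ((hx | rfl) | ⟨k, hk, hle, rfl⟩)
      · exact Or.inl hx
      · exact Or.inr ⟨i, le_refl _, h, rfl⟩
      · exact Or.inr ⟨k, by omega, hle, rfl⟩
    · rintro (hx | ⟨k, hk, hle, rfl⟩)
      · exact Or.inl (Or.inl hx)
      · rcases eq_or_lt_of_le hk with rfl | hk'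
        · exact Or.inl (Or.inr rfl)
        · exact Or.inr ⟨k, by omega, hle, rfl⟩
  | case2 i acc h =>
    constructor
    · exact Or.inl
    · rintro (hx | ⟨k, hk, hle, rfl⟩)
      · exact hx
      · exfalso
        have h1 : i * i ≤ k * k := by nlinarith
        omega

-- membership in B's outer loop (called with j ≥ 1)
theorem mem_altOuter (N j : Int) (acc : PySem.Set Int) (hj : 1 ≤ j) (x : Int) :
    x ∈ altOuter N j acc ↔
      x ∈ acc ∨ ∃ l k, j ≤ l ∧ 1 ≤ k ∧ l * l + k * k ≤ N ∧ x = l * l + k * k := by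
  fun_induction altOuter N j acc with
  | case1 j acc h ih =>
    rw [ih (by omega), mem_altInner N j 1 acc (le_refl _) x]
    constructor
    · rintro ((hx | ⟨k, hk, hle, rfl⟩) | ⟨l, k, hl, hk, hle, rfl⟩)
      · exact Or.inl hx
      · exact Or.inr ⟨j, k, le_refl _, hk, hle, rfl⟩
      · exact Or.inr ⟨l, k, by omega, hk, hle, rfl⟩
    · rintro (hx | ⟨l, k, hl, hk, hle, rfl⟩)
      · exact Or.inl (Or.inl hx)
      · rcases eq_or_lt_of_le hl with rfl | hl'
        · exact Or.inl (Or.inr ⟨k, hk, hle, rfl⟩)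
        · exact Or.inr ⟨l, k, by omega, hk, hle, rfl⟩
  | case2 j acc h =>
    constructor
    · exact Or.inl
    · rintro (hx | ⟨l, k, hl, hk, hle, rfl⟩)
      · exact hx
      · exfalso
        have h1 : j * j ≤ l * l := by nlinarith
        have h2 : 1 ≤ k * k := by nlinarith
        omega

-- A's set and B's set contain the same numbers
theorem mem_iff (N x : Int) :
    x ∈ (PySem.List.pyRange 1 N 1).foldl (fun acc j =>
        (PySem.List.pyRange 1 N 1).foldl (fun acc i =>
          let d2 := j ^ 2 + i ^ 2
          if d2 > N then acc else PySem.Set.add acc d2) acc) PySem.Set.empty ↔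
      x ∈ altOuter N 1 PySem.Set.empty := by
  rw [mem_outerFold, mem_altOuter N 1 PySem.Set.empty (le_refl _)]
  simp only [PySem.Set.empty, List.not_mem_nil, false_or, PySem.List.mem_pyRange_one]
  constructor
  · rintro ⟨j, ⟨hj1, hjN⟩, i, ⟨hi1, hiN⟩, hle, rfl⟩
    exact ⟨j, i, hj1, hi1, by nlinarith, by ring⟩
  · rintro ⟨l, k, hl, hk, hle, rfl⟩
    have h1 : l ≤ l * l := int_le_mul_self l
    have h2 : k ≤ k * k := int_le_mul_self k
    have h3 : 1 ≤ l * l := by nlinarith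
    have h4 : 1 ≤ k * k := by nlinarith
    exact ⟨l, ⟨hl, by omega⟩, k, ⟨hk, by omega⟩, by nlinarith, by ring⟩

-- A's inner fold preserves Nodup
theorem nodup_innerFold (N j : Int) (l : List Int) (acc : PySem.Set Int) (h : acc.Nodup) :
    (l.foldl (fun acc i =>
        let d2 := j ^ 2 + i ^ 2
        if d2 > N then acc else PySem.Set.add acc d2) acc).Nodup := by
  induction l generalizing acc with
  | nil => exact h
  | cons a t ih =>
    simp only [List.foldl_cons]
    apply ih
    split_ifs with hc
    · exact h
    · exact PySem.Set.nodup_add acc _ h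

theorem nodup_outerFold (N : Int) (l : List Int) (acc : PySem.Set Int) (h : acc.Nodup) :
    (l.foldl (fun acc j =>
        (PySem.List.pyRange 1 N 1).foldl (fun acc i =>
          let d2 := j ^ 2 + i ^ 2
          if d2 > N then acc else PySem.Set.add acc d2) acc) acc).Nodup := by
  induction l generalizing acc with
  | nil => exact h
  | cons a t ih => exact ih _ (nodup_innerFold N a _ acc h)

theorem nodup_altInner (N j i : Int) (acc : PySem.Set Int) (h : acc.Nodup) :
    (altInner N j i acc).Nodup := by
  fun_induction altInner N j i acc with
  | case1 i acc hc ih => exact ih (PySem.Set.nodup_add acc _ h)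
  | case2 i acc hc => exact h

theorem nodup_altOuter (N j : Int) (acc : PySem.Set Int) (h : acc.Nodup) :
    (altOuter N j acc).Nodup := by
  fun_induction altOuter N j acc with
  | case1 j acc hc ih => exact ih (nodup_altInner N j 1 acc h)
  | case2 j acc hc => exact h

-- ===== VERDICT (by name: the statement is the Claim_ definition above) =====
theorem sorted_diameters_spec : Claim_equal_sorted_diameters := by
  intro N _
  unfold Spec_sorted_diameters sorted_diameters sorted_diameters_alt
  apply PySem.List.sorted_eq_sorted_of_perm _ _ _ (fun a b h => h)
  rw [List.perm_ext_iff_of_nodup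
    (nodup_outerFold N _ PySem.Set.empty (by simp [PySem.Set.empty]))
    (nodup_altOuter N 1 PySem.Set.empty (by simp [PySem.Set.empty]))]
  exact mem_iff N
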